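-- pv_equiv track=rewrite | github.com/lyonsno/auto-grader | scripts/narrator_reader.py | _ordered_group_pairs
-- ===== SOURCE A (Python) =====
-- _LEGIBILITY_STRUCTURED_ROW_ORDER = {
--     "basis": 1,
--     "ambiguity": 2,
--     "credit_preserved": 3,
--     "deduction": 4,
--     "review_marker": 5,
--     "professor_mismatch": 6,
-- }
--
-- def _ordered_group_pairs(
--     group: list[tuple[tuple[str, str, int | None], int]],
-- ) -> list[tuple[tuple[str, str, int | None], int]]:
--     header = [pair for pair in group if pair[0][0] == "header"]
--     lines = [pair for pair in group if pair[0][0] == "line"]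
--     rest = [pair for pair in group if pair[0][0] not in ("header", "line")]
--     rest.sort(
--         key=lambda pair: {
--             "topic": 0,
--             **_LEGIBILITY_STRUCTURED_ROW_ORDER,
--             "checkpoint": 7,
--         }.get(pair[0][0], 2)
--     )
--     return [*header, *rest, *reversed(lines)]
-- ===== SOURCE B (Python) =====
-- # B: single-pass bucket partition (no sort): one loop distributes pairs into
-- # header / per-priority buckets / lines, then concatenates.
-- _PRIORITY = {
--     "topic": 0,
--     "basis": 1,
--     "ambiguity": 2,
--     "credit_preserved": 3,
--     "deduction": 4,
--     "review_marker": 5,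
--     "professor_mismatch": 6,
--     "checkpoint": 7,
-- }
--
-- def _ordered_group_pairs(
--     group: list[tuple[tuple[str, str, int | None], int]],
-- ) -> list[tuple[tuple[str, str, int | None], int]]:
--     header = []
--     lines = []
--     buckets = {}
--     for pair in group:
--         tag = pair[0][0]
--         if tag == "header":
--             header.append(pair)
--         elif tag == "line":
--             lines.append(pair)
--         else:
--             buckets.setdefault(_PRIORITY.get(tag, 2), []).append(pair)
--     out = header
--     for k in range(8):
--         out += buckets.get(k, [])
--     return out + lines[::-1]
-- ===== Notes on version B (the rewrite author's own statement) =====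
-- stated objective: faster
-- what changed: Replaced A's three filter passes plus a stable sort (whose key lambda rebuilds the merged priority dict per element) by a single pass that distributes pairs into header / per-priority dict buckets / lines and concatenates them in priority order.
import Mathlib
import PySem

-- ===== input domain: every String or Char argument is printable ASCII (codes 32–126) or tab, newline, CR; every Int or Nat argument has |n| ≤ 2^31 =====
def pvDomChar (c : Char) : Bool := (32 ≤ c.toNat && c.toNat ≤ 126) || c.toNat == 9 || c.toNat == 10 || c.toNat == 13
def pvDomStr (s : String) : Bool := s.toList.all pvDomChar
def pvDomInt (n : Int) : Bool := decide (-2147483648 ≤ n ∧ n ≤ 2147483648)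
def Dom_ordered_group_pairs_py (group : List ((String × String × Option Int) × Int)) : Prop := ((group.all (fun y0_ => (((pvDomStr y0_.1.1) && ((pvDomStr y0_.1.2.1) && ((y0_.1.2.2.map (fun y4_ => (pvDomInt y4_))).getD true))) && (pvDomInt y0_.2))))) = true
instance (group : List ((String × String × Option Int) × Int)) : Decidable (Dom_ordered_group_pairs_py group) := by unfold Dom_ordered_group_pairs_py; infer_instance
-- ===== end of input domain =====

-- B replaces A's three filter passes + stable sort by a single-pass bucket partition
-- (header / per-priority dict buckets / lines), then concatenates (objective: alternative).

-- ===== PORT A =====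
-- _LEGIBILITY_STRUCTURED_ROW_ORDER (module constant)
def pvLegibilityStructuredRowOrder : PySem.Dict String Int :=
  PySem.Dict.ofList [("basis", 1), ("ambiguity", 2), ("credit_preserved", 3),
    ("deduction", 4), ("review_marker", 5), ("professor_mismatch", 6)]

-- the key lambda: {"topic": 0, **_LEGIBILITY_STRUCTURED_ROW_ORDER, "checkpoint": 7}.get(tag, 2)
def pvKeyA (tag : String) : Int :=
  (((PySem.Dict.empty.insert "topic" 0).update pvLegibilityStructuredRowOrder.items).insert
      "checkpoint" 7).getD tag 2

def ordered_group_pairs_py (group : List ((String × String × Option Int) × Int)) :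
    List ((String × String × Option Int) × Int) :=
  let header := group.filter (fun pair => pair.1.1 == "header")
  let lines := group.filter (fun pair => pair.1.1 == "line")
  let rest := group.filter (fun pair => !(pair.1.1 == "header" || pair.1.1 == "line"))
  -- rest.sort(key=…) is the stable sort of rest by the key
  let restSorted := PySem.List.sorted rest (fun pair => pvKeyA pair.1.1) false
  header ++ restSorted ++ lines.reverse

-- ===== PORT B =====
-- _PRIORITY (module constant of Source B)
def pvPriorityB : PySem.Dict String Int :=
  PySem.Dict.ofList [("topic", 0), ("basis", 1), ("ambiguity", 2), ("credit_preserved", 3),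
    ("deduction", 4), ("review_marker", 5), ("professor_mismatch", 6), ("checkpoint", 7)]

def ordered_group_pairs_py_alt (group : List ((String × String × Option Int) × Int)) :
    List ((String × String × Option Int) × Int) :=
  -- one pass: state = ((header, lines), buckets); buckets.setdefault(k, []).append(pair)
  -- is Dict.modify k [] (· ++ [pair])
  let st := group.foldl
    (fun (s : (List ((String × String × Option Int) × Int) ×
               List ((String × String × Option Int) × Int)) ×
              PySem.Dict Int (List ((String × String × Option Int) × Int))) pair =>
      if pair.1.1 == "header" then ((s.1.1 ++ [pair], s.1.2), s.2)
      else if pair.1.1 == "line" then ((s.1.1, s.1.2 ++ [pair]), s.2)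
      else ((s.1.1, s.1.2), s.2.modify (pvPriorityB.getD pair.1.1 2) [] (· ++ [pair])))
    (([], []), PySem.Dict.empty)
  -- for k in range(8): out += buckets.get(k, [])
  let out := (PySem.List.pyRange 0 8 1).foldl (fun out k => out ++ st.2.getD k []) st.1.1
  -- lines[::-1]; step -1 never raises, so slice? is always `some`
  out ++ (PySem.List.slice? st.1.2 none none (-1)).getD []

-- ===== PRECONDITION & SPEC =====
def Spec_ordered_group_pairs_py (group : List ((String × String × Option Int) × Int)) (out : List ((String × String × Option Int) × Int)) : Prop := out = ordered_group_pairs_py_alt group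
instance (group : List ((String × String × Option Int) × Int)) (out : List ((String × String × Option Int) × Int)) : Decidable (Spec_ordered_group_pairs_py group out) := by unfold Spec_ordered_group_pairs_py; infer_instance

-- ===== CLAIM (what is proved, stated in full; the proofs are below) =====
def Claim_equal_ordered_group_pairs_py : Prop := ∀ (group : List ((String × String × Option Int) × Int)), Dom_ordered_group_pairs_py group → Spec_ordered_group_pairs_py group (ordered_group_pairs_py group)

-- ===== LEMMAS AND PROOFS =====

-- the two priority dictionaries are the same 8-entry dictionary
theorem pv_dict_eq :
    ((PySem.Dict.empty.insert "topic" 0).update pvLegibilityStructuredRowOrder.items).insert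
        "checkpoint" 7 = pvPriorityB := by decide

-- the priority key always lies in 0..7
theorem pv_key_range (tag : String) :
    0 ≤ pvPriorityB.getD tag 2 ∧ pvPriorityB.getD tag 2 ≤ 7 := by
  have h : pvPriorityB = PySem.Dict.mk [("topic", 0), ("basis", 1), ("ambiguity", 2),
      ("credit_preserved", 3), ("deduction", 4), ("review_marker", 5),
      ("professor_mismatch", 6), ("checkpoint", 7)] := by decide
  rw [h]
  simp only [PySem.Dict.getD_eq_get?_getD, PySem.Dict.get?_mk_cons]
  split_ifs <;> simp_all [PySem.Dict.get?]

-- insertBy walks past a prefix none of whose elements x goes before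
theorem pv_insertBy_skip {α : Type} (before : α → α → Bool) (x : α) (L1 L2 : List α)
    (h : ∀ y ∈ L1, before x y = false) :
    PySem.List.insertBy before x (L1 ++ L2) = L1 ++ PySem.List.insertBy before x L2 := by
  induction L1 with
  | nil => simp
  | cons a as ih =>
    simp only [List.cons_append, PySem.List.insertBy, h a (by simp)]
    simp [ih (fun y hy => h y (by simp [hy]))]

-- insertBy puts x in front of a list x goes before everywhere
theorem pv_insertBy_front {α : Type} (before : α → α → Bool) (x : α) (L : List α)
    (h : ∀ y ∈ L, before x y = true) :
    PySem.List.insertBy before x L = x :: L := by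
  cases L with
  | nil => rfl
  | cons a as => simp [PySem.List.insertBy, h a (by simp)]

theorem pv_sorted_append_singleton {α : Type} (key : α → Int) (xs : List α) (x : α) :
    PySem.List.sorted (xs ++ [x]) key false =
      PySem.List.insertBy (fun a b => decide (key a < key b)) x
        (PySem.List.sorted xs key false) := by
  simp [PySem.List.sorted, List.foldl_append]

-- concatenation of the per-key buckets of xs, over the key list ks
def pvCat {α : Type} (key : α → Int) (xs : List α) : List Int → List α
  | [] => []
  | k :: ks => xs.filter (fun a => key a == k) ++ pvCat key xs ks

theorem pv_pvCat_nil {α : Type} (key : α → Int) (ks : List Int) :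
    pvCat key ([] : List α) ks = [] := by
  induction ks with
  | nil => rfl
  | cons k ks ih => simp [pvCat, ih]

theorem pv_mem_pvCat {α : Type} (key : α → Int) (xs : List α) (ks : List Int) (y : α)
    (hy : y ∈ pvCat key xs ks) : key y ∈ ks := by
  induction ks with
  | nil => simp [pvCat] at hy
  | cons k ks ih =>
    simp only [pvCat, List.mem_append] at hy
    rcases hy with hy | hy
    · have := (List.mem_filter.mp hy).2
      simp at this
      simp [this]
    · simp [ih hy]

theorem pv_pvCat_append_not_mem {α : Type} (key : α → Int) (xs : List α) (x : α)
    (ks : List Int) (hx : key x ∉ ks) :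
    pvCat key (xs ++ [x]) ks = pvCat key xs ks := by
  induction ks with
  | nil => rfl
  | cons k ks ih =>
    have hk : (key x == k) = false := by
      simp only [beq_eq_false_iff_ne, ne_eq]
      intro h; exact hx (by simp [h])
    simp only [pvCat, List.filter_append, List.filter_cons, hk, Bool.false_eq_true,
      if_false, List.filter_nil, List.append_nil]
    rw [ih (fun h => hx (by simp [h]))]

theorem pv_insert_pvCat {α : Type} (key : α → Int) (xs : List α) (x : α) (ks : List Int)
    (hks : ks.Pairwise (· < ·)) (hx : key x ∈ ks) :
    PySem.List.insertBy (fun a b => decide (key a < key b)) x (pvCat key xs ks) =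
      pvCat key (xs ++ [x]) ks := by
  induction ks with
  | nil => simp at hx
  | cons k ks ih =>
    rcases List.pairwise_cons.mp hks with ⟨hlt, hks'⟩
    by_cases hk : key x = k
    · -- insert at the end of bucket k; later buckets untouched
      have hnot : key x ∉ ks := fun h => by have := hlt _ h; omega
      rw [pvCat, pv_insertBy_skip _ x _ _
          (fun y hy => by
            have := (List.mem_filter.mp hy).2
            simp only [beq_iff_eq] at this
            simp only [decide_eq_false_iff_not]
            omega),
        pv_insertBy_front _ x _
          (fun y hy => by
            have := pv_mem_pvCat key xs ks y hy
            have := hlt _ this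
            simp only [decide_eq_true_eq]
            omega)]
      simp only [pvCat, List.filter_append, List.filter_cons, List.filter_nil]
      rw [pv_pvCat_append_not_mem key xs x ks hnot]
      simp [hk]
    · -- key x lies in a later bucket: skip bucket k
      have hx' : key x ∈ ks := by
        rcases List.mem_cons.mp hx with h | h
        · exact absurd h hk
        · exact h
      rw [pvCat, pv_insertBy_skip _ x _ _
          (fun y hy => by
            have := (List.mem_filter.mp hy).2
            simp only [beq_iff_eq] at this
            have := hlt _ hx'
            simp only [decide_eq_false_iff_not]
            omega),
        ih hks' hx']
      have hkx : (key x == k) = false := by simp [hk]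
      simp only [pvCat, List.filter_append, List.filter_cons, hkx, Bool.false_eq_true,
        if_false, List.filter_nil, List.append_nil]

-- the stable sort by an Int key with values in ks (strictly increasing) is the bucket concatenation
theorem pv_sorted_eq_pvCat {α : Type} (key : α → Int) (ks : List Int)
    (hks : ks.Pairwise (· < ·)) (xs : List α) (hxs : ∀ a ∈ xs, key a ∈ ks) :
    PySem.List.sorted xs key false = pvCat key xs ks := by
  induction xs using List.reverseRecOn with
  | nil => simp [PySem.List.sorted, pv_pvCat_nil]
  | append_singleton xs x ih =>
    rw [pv_sorted_append_singleton, ih (fun a ha => hxs a (by simp [ha])),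
      pv_insert_pvCat key xs x ks hks (hxs x (by simp))]

-- B's dict component: the bucket it accumulates at key c
theorem pv_foldB_bucket (group : List ((String × String × Option Int) × Int))
    (d : PySem.Dict Int (List ((String × String × Option Int) × Int))) (c : Int) :
    ((group.foldl
        (fun (d : PySem.Dict Int (List ((String × String × Option Int) × Int))) pair =>
          if pair.1.1 == "header" then d
          else if pair.1.1 == "line" then d
          else d.modify (pvPriorityB.getD pair.1.1 2) [] (· ++ [pair])) d).getD c []) =
      d.getD c [] ++
        group.filter (fun pair =>
          !(pair.1.1 == "header" || pair.1.1 == "line") &&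
            (pvPriorityB.getD pair.1.1 2 == c)) := by
  induction group generalizing d with
  | nil => simp
  | cons pair rest ih =>
    rw [List.foldl_cons]
    by_cases h1 : pair.1.1 == "header"
    · rw [if_pos h1, ih, List.filter_cons]
      simp [h1]
    · by_cases h2 : pair.1.1 == "line"
      · rw [if_neg (by simp [h1]), if_pos h2, ih, List.filter_cons]
        simp [h2]
      · rw [if_neg (by simp [h1]), if_neg (by simp [h2]), ih, List.filter_cons]
        rw [PySem.Dict.getD_modify]
        by_cases hc : c = pvPriorityB.getD pair.1.1 2
        · simp [hc, h1, h2]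
        · have hne : (pvPriorityB.getD pair.1.1 2 == c) = false := by
            simp only [beq_eq_false_iff_ne, ne_eq]; omega
          simp [hc, h1, h2, hne]

-- ===== VERDICT (by name: the statement is the Claim_ definition above) =====
theorem pv_keyA_eq (tag : String) : pvKeyA tag = pvPriorityB.getD tag 2 := by
  unfold pvKeyA
  rw [pv_dict_eq]

theorem pv_foldB_split (group : List ((String × String × Option Int) × Int))
    (s0 : (List ((String × String × Option Int) × Int) ×
           List ((String × String × Option Int) × Int)) ×
          PySem.Dict Int (List ((String × String × Option Int) × Int))) :
    group.foldl
      (fun s pair =>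
        if pair.1.1 == "header" then ((s.1.1 ++ [pair], s.1.2), s.2)
        else if pair.1.1 == "line" then ((s.1.1, s.1.2 ++ [pair]), s.2)
        else ((s.1.1, s.1.2), s.2.modify (pvPriorityB.getD pair.1.1 2) [] (· ++ [pair]))) s0 =
    ((group.foldl (fun h pair => if pair.1.1 == "header" then h ++ [pair] else h) s0.1.1,
      group.foldl (fun l pair => if pair.1.1 == "line" then l ++ [pair] else l) s0.1.2),
     group.foldl
       (fun d pair =>
         if pair.1.1 == "header" then d
         else if pair.1.1 == "line" then d
         else d.modify (pvPriorityB.getD pair.1.1 2) [] (· ++ [pair])) s0.2) := by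
  induction group generalizing s0 with
  | nil => rfl
  | cons pair rest ih =>
    rw [List.foldl_cons, List.foldl_cons, List.foldl_cons, List.foldl_cons, ih]
    by_cases h1 : pair.1.1 == "header"
    · have hl : (pair.1.1 == "line") = false := by
        have := eq_of_beq h1; simp [this]
      simp [h1, hl]
    · by_cases h2 : pair.1.1 == "line" <;> simp [h1, h2]

theorem ordered_group_pairs_py_spec : Claim_equal_ordered_group_pairs_py := by
  intro group _
  unfold Spec_ordered_group_pairs_py ordered_group_pairs_py ordered_group_pairs_py_alt
  rw [pv_foldB_split]
  simp only [PySem.List.foldl_append_if_eq_filter, List.nil_append]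
  rw [show PySem.List.pyRange 0 8 = [0, 1, 2, 3, 4, 5, 6, 7] from by decide]
  simp only [List.foldl_cons, List.foldl_nil, pv_foldB_bucket, PySem.Dict.getD_empty,
    List.nil_append, PySem.List.slice?_none_none_neg_one, Option.getD_some]
  have hkmem : ∀ a : (String × String × Option Int) × Int,
      pvKeyA a.1.1 ∈ ([0, 1, 2, 3, 4, 5, 6, 7] : List Int) := by
    intro a
    rw [pv_keyA_eq]
    have := pv_key_range a.1.1
    simp only [List.mem_cons, List.not_mem_nil, or_false]
    omega
  rw [pv_sorted_eq_pvCat _ [0, 1, 2, 3, 4, 5, 6, 7] (by decide) _ (fun a _ => hkmem a)]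
  simp only [pvCat, List.filter_filter, List.append_nil]
  have hp : ∀ k : Int,
      (fun (a : (String × String × Option Int) × Int) =>
        pvKeyA a.1.1 == k && !(a.1.1 == "header" || a.1.1 == "line")) =
      (fun (pair : (String × String × Option Int) × Int) =>
        !(pair.1.1 == "header" || pair.1.1 == "line") && pvPriorityB.getD pair.1.1 2 == k) := by
    intro k
    funext a
    rw [pv_keyA_eq]
    exact Bool.and_comm _ _
  simp only [hp, List.append_assoc]
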